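-- pv_equiv track=rewrite | github.com/b-zhu524/usaco_practice | shell/shell.py | procedure
-- ===== SOURCE A (Python) =====
-- def procedure(swaps, pebble_idx):
--     score = 0
--     for a, b, g in swaps:
--         if a == pebble_idx:
--             pebble_idx = b
--         elif b == pebble_idx:
--             pebble_idx = a
--         if g == pebble_idx:
--             score += 1
--     return score
-- ===== SOURCE B (Python) =====
-- def _pull_back(prefix, pos):
--     # each swap is its own inverse, so pulling pos back through the swaps in
--     # reverse order recovers the starting position that would reach pos
--     for a, b, _ in reversed(prefix):
--         if pos == a:
--             pos = b
--         elif pos == b: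
--             pos = a
--     return pos
--
-- def procedure(swaps, pebble_idx):
--     # guess g at step i is correct iff pulling g back through swaps[:i+1]
--     # lands on the initial pebble position; no running position is carried
--     return sum(1 for i, (_, _, g) in enumerate(swaps)
--                if _pull_back(swaps[:i + 1], g) == pebble_idx)
-- ===== Notes on version B (the rewrite author's own statement) =====
-- stated objective: alternative
-- what changed: B carries no running pebble position: it checks each guess independently by pulling it backwards through the reversed prefix of swaps (each swap is an involution) and testing whether it lands on the initial pebble position, an O(n^2) inverse-simulation instead of A's O(n) forward simulation with a score accumulator.
import Mathlib
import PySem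

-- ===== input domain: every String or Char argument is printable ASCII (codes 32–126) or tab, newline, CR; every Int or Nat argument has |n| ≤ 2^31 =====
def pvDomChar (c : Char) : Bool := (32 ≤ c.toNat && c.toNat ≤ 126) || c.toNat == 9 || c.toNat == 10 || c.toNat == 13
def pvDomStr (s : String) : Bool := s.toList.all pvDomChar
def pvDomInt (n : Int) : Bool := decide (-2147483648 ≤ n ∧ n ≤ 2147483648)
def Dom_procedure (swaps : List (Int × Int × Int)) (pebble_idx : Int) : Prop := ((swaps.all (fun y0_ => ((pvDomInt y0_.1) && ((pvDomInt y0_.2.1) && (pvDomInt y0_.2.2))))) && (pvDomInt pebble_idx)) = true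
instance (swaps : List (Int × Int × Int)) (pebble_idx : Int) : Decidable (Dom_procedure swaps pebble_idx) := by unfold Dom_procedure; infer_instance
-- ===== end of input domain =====

-- B replaces A's forward simulation by an independent backward check per guess (pull the guess back through the reversed swap pfx); alternative algorithm, same results.


-- ===== PORT A =====
def procedure (swaps : List (Int × Int × Int)) (pebble_idx : Int) : Int :=
  (swaps.foldl (fun (st : Int × Int) s =>
    let p := if s.1 = st.1 then s.2.1 else if s.2.1 = st.1 then s.1 else st.1
    (p, if s.2.2 = p then st.2 + 1 else st.2)) (pebble_idx, 0)).2

-- ===== PORT B =====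
-- _pull_back from Source B: fold the swap rule over the reversed pfx
def pvPullBack (pfx : List (Int × Int × Int)) (pos : Int) : Int :=
  pfx.reverse.foldl
    (fun pos s => if pos = s.1 then s.2.1 else if pos = s.2.1 then s.1 else pos) pos

def procedure_alt (swaps : List (Int × Int × Int)) (pebble_idx : Int) : Int :=
  ((PySem.List.enumerate swaps).countP
    (fun x => pvPullBack (PySem.List.slice swaps (some 0) (some (x.1 + 1))) x.2.2.2
                == pebble_idx) : Int)

-- ===== PRECONDITION & SPEC =====
def Spec_procedure (swaps : List (Int × Int × Int)) (pebble_idx : Int) (out : Int) : Prop := out = procedure_alt swaps pebble_idx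
instance (swaps : List (Int × Int × Int)) (pebble_idx : Int) (out : Int) : Decidable (Spec_procedure swaps pebble_idx out) := by unfold Spec_procedure; infer_instance

-- ===== CLAIM (what is proved, stated in full; the proofs are below) =====
def Claim_equal_procedure : Prop := ∀ (swaps : List (Int × Int × Int)) (pebble_idx : Int), Dom_procedure swaps pebble_idx → Spec_procedure swaps pebble_idx (procedure swaps pebble_idx)

-- ===== LEMMAS AND PROOFS =====

-- the swap step, as used by both ports
def pvF (pos : Int) (s : Int × Int × Int) : Int :=
  if pos = s.1 then s.2.1 else if pos = s.2.1 then s.1 else pos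

lemma pvF_invol (p : Int) (s : Int × Int × Int) : pvF (pvF p s) s = p := by
  unfold pvF; split_ifs <;> omega

lemma pv_inv1 (l : List (Int × Int × Int)) : ∀ p : Int,
    l.reverse.foldl pvF (l.foldl pvF p) = p := by
  induction l with
  | nil => intro p; simp
  | cons s ls ih =>
    intro p
    simp only [List.reverse_cons, List.foldl_cons, List.foldl_append, List.foldl_cons,
      List.foldl_nil, ih (pvF p s), pvF_invol]

lemma pv_inv2 (l : List (Int × Int × Int)) : ∀ g : Int,
    l.foldl pvF (l.reverse.foldl pvF g) = g := by
  induction l with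
  | nil => intro g; simp
  | cons s ls ih =>
    intro g
    simp only [List.reverse_cons, List.foldl_append, List.foldl_cons, List.foldl_nil,
      pvF_invol, ih g]

lemma pv_pull_iff (l : List (Int × Int × Int)) (g p : Int) :
    l.reverse.foldl pvF g = p ↔ l.foldl pvF p = g := by
  constructor
  · intro h; rw [← h, pv_inv2]
  · intro h; rw [← h, pv_inv1]

-- shared recursive score: count of steps whose guess equals the post-swap position
def pvS : List (Int × Int × Int) → Int → Int
  | [], _ => 0
  | s :: ss, p => (if s.2.2 = pvF p s then 1 else 0) + pvS ss (pvF p s)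

lemma pv_A_eq (l : List (Int × Int × Int)) : ∀ (p c : Int),
    (l.foldl (fun (st : Int × Int) s =>
      let q := if s.1 = st.1 then s.2.1 else if s.2.1 = st.1 then s.1 else st.1
      (q, if s.2.2 = q then st.2 + 1 else st.2)) (p, c)).2 = c + pvS l p := by
  induction l with
  | nil => intro p c; simp [pvS]
  | cons s ls ih =>
    intro p c
    have hq : (if s.1 = p then s.2.1 else if s.2.1 = p then s.1 else p) = pvF p s := by
      unfold pvF; split_ifs <;> omega
    simp only [List.foldl_cons, pvS, hq]
    rw [ih]
    by_cases h : s.2.2 = pvF p s <;> simp [h] <;> omega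

lemma pv_B_eq (l : List (Int × Int × Int)) : ∀ (pre : List (Int × Int × Int)) (p0 : Int),
    ((PySem.List.enumerate l (pre.length : Int)).countP
      (fun x => pvPullBack (PySem.List.slice (pre ++ l) (some 0) (some (x.1 + 1))) x.2.2.2
                  == p0) : Int)
    = pvS l (pre.foldl pvF p0) := by
  induction l with
  | nil => intro pre p0; simp [PySem.List.enumerate_nil, pvS]
  | cons s ls ih =>
    intro pre p0
    rw [PySem.List.enumerate_cons, List.countP_cons]
    have hsl : PySem.List.slice (pre ++ s :: ls) (some 0) (some ((pre.length : Int) + 1))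
        = pre ++ [s] := by
      have h1 : ((pre.length : Int) + 1) = ((pre.length + 1 : Nat) : Int) := by push_cast; ring
      rw [h1, PySem.List.slice_zero_start, PySem.List.slice_to_natCast]
      have happ : pre ++ s :: ls = (pre ++ [s]) ++ ls := by simp
      rw [happ, List.take_append_of_le_length (by simp)]
      simp
    have hpull : ∀ (m : List (Int × Int × Int)) (g : Int),
        pvPullBack m g = m.reverse.foldl pvF g := by
      intro m g; rfl
    have hhead : ((pvPullBack (PySem.List.slice (pre ++ s :: ls) (some 0)
          (some ((pre.length : Int) + 1))) s.2.2 == p0) = true)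
        ↔ (s.2.2 = pvF (pre.foldl pvF p0) s) := by
      rw [hsl, hpull]
      simp only [beq_iff_eq]
      rw [pv_pull_iff]
      simp only [List.foldl_append, List.foldl_cons, List.foldl_nil]
      exact eq_comm
    have htail :
        ((PySem.List.enumerate ls ((pre.length : Int) + 1)).countP
          (fun x => pvPullBack (PySem.List.slice (pre ++ s :: ls) (some 0) (some (x.1 + 1)))
              x.2.2.2 == p0) : Int)
        = pvS ls (pvF (pre.foldl pvF p0) s) := by
      have hlen : ((pre.length : Int) + 1) = (((pre ++ [s]).length : Nat) : Int) := by
        simp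
      have happ : pre ++ s :: ls = (pre ++ [s]) ++ ls := by simp
      rw [hlen, happ, ih (pre ++ [s]) p0]
      simp [List.foldl_append]
    push_cast
    rw [htail]
    simp only [pvS]
    by_cases h : s.2.2 = pvF (pre.foldl pvF p0) s
    · rw [if_pos (hhead.mpr h), if_pos h]; ring
    · rw [if_neg (fun hc => h (hhead.mp hc)), if_neg h]; ring

-- ===== VERDICT (by name: the statement is the Claim_ definition above) =====
theorem procedure_spec : Claim_equal_procedure := by
  intro swaps pebble_idx _
  unfold Spec_procedure procedure procedure_alt
  have hB := pv_B_eq swaps [] pebble_idx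
  simp only [List.length_nil, Nat.cast_zero, List.nil_append, List.foldl_nil] at hB
  rw [pv_A_eq, hB]
  ring
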